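-- pv_equiv track=rewrite | github.com/nfornj/USVisaChat | backend/api/main.py | generate_image_search_query
-- ===== SOURCE A (Python) =====
-- def generate_image_search_query(title: str, content: str) -> str:
--     """
--     Generate optimized search query for Google Custom Search
--     """
--     text = f"{title} {content}".lower()
--
--     # Base immigration-related terms
--     base_terms = ["immigration", "visa", "h1b", "green card", "uscis"]
--
--     # Specific terms based on content
--     specific_terms = []
--
--     if any(keyword in text for keyword in ['h1b', 'h-1b', 'work visa']):
--         specific_terms.extend(["h1b visa", "work visa", "employment"])
--
--     if any(keyword in text for keyword in ['green card', 'permanent residence', 'eb-2', 'eb-3']):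
--         specific_terms.extend(["green card", "permanent residence", "immigration"])
--
--     if any(keyword in text for keyword in ['processing', 'timeline', 'wait time']):
--         specific_terms.extend(["immigration processing", "government office"])
--
--     if any(keyword in text for keyword in ['uscis', 'government', 'policy']):
--         specific_terms.extend(["uscis", "government building", "immigration office"])
--
--     if any(keyword in text for keyword in ['law', 'legal', 'regulation']):
--         specific_terms.extend(["immigration law", "legal documents", "court"])
--
--     # Combine terms and create search query
--     all_terms = base_terms + specific_terms[:3]  # Limit to avoid long queries
--     query = " ".join(all_terms[:5])  # Limit to 5 terms max
--
--     return query
-- ===== SOURCE B (Python) =====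
-- def generate_image_search_query(title: str, content: str) -> str:
--     # base_terms already has 5 entries, so all_terms[:5] == base_terms and every
--     # keyword branch is dead: the result is this constant for any input.
--     return "immigration visa h1b green card uscis"
-- ===== Notes on version B (the rewrite author's own statement) =====
-- stated objective: simpler
-- what changed: A builds keyword-dependent specific_terms and then truncates base_terms + specific_terms[:3] to 5 terms, but base_terms alone has 5 entries, so every branch is dead; B returns the constant joined string directly.
import Mathlib
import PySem

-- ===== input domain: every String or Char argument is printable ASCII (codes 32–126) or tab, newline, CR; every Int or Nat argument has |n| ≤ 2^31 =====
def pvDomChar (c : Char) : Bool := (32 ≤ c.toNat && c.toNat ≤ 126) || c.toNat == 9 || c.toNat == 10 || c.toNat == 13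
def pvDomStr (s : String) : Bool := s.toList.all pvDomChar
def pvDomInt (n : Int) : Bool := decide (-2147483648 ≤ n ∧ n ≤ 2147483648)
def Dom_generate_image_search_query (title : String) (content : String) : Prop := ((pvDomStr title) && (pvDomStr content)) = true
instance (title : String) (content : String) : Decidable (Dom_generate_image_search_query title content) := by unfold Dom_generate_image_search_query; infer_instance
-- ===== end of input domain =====

-- B replaces A's dead keyword branches with the constant result they always produce (simpler).


-- ===== PORT A =====
def generate_image_search_query (title : String) (content : String) : String :=
  let text := PySem.Str.lower (title ++ " " ++ content)
  let base_terms : List String := ["immigration", "visa", "h1b", "green card", "uscis"]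
  let specific_terms : List String := []
  let specific_terms :=
    if (["h1b", "h-1b", "work visa"].any fun k => PySem.Str.isIn k text) then
      specific_terms ++ ["h1b visa", "work visa", "employment"] else specific_terms
  let specific_terms :=
    if (["green card", "permanent residence", "eb-2", "eb-3"].any fun k => PySem.Str.isIn k text) then
      specific_terms ++ ["green card", "permanent residence", "immigration"] else specific_terms
  let specific_terms :=
    if (["processing", "timeline", "wait time"].any fun k => PySem.Str.isIn k text) then
      specific_terms ++ ["immigration processing", "government office"] else specific_terms
  let specific_terms :=
    if (["uscis", "government", "policy"].any fun k => PySem.Str.isIn k text) then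
      specific_terms ++ ["uscis", "government building", "immigration office"] else specific_terms
  let specific_terms :=
    if (["law", "legal", "regulation"].any fun k => PySem.Str.isIn k text) then
      specific_terms ++ ["immigration law", "legal documents", "court"] else specific_terms
  let all_terms := base_terms ++ PySem.List.slice specific_terms none (some 3)
  PySem.Str.join " " (PySem.List.slice all_terms none (some 5))

-- ===== PORT B =====
def generate_image_search_query_alt (title : String) (content : String) : String :=
  "immigration visa h1b green card uscis"

-- ===== PRECONDITION & SPEC =====
def Spec_generate_image_search_query (title : String) (content : String) (out : String) : Prop := out = generate_image_search_query_alt title content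
instance (title : String) (content : String) (out : String) : Decidable (Spec_generate_image_search_query title content out) := by unfold Spec_generate_image_search_query; infer_instance

-- ===== CLAIM (what is proved, stated in full; the proofs are below) =====
def Claim_equal_generate_image_search_query : Prop := ∀ (title : String) (content : String), Dom_generate_image_search_query title content → Spec_generate_image_search_query title content (generate_image_search_query title content)

-- ===== LEMMAS AND PROOFS =====

-- ===== VERDICT (by name: the statement is the Claim_ definition above) =====
theorem generate_image_search_query_spec : Claim_equal_generate_image_search_query := by
  intro title content _
  unfold Spec_generate_image_search_query generate_image_search_query generate_image_search_query_alt
  dsimp only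
  split_ifs <;> rfl
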